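-- pv_equiv track=rewrite | github.com/RITZ230790/List-Spinner | exam2.py | CCw
-- ===== SOURCE A (Python) =====
-- def CCw (listA):
--     for i in range(len(listA)):
--         if i == 0:
--             tambah = 2
--             for j in range(len(listA[i])):
--                 temp = int(listA[i][j])
--                 temp += tambah
--                 listA[i][j] = temp
--                 tambah += 2
--         elif i == 1:
--             tambah = -2
--             for j in range(len(listA[i])):
--                 temp = int(listA[i][j])
--                 temp += tambah
--                 listA[i][j] = temp
--                 tambah += 2
--         elif i == 2:
--             tambah = -6
--             for j in range(len(listA[i])):
--                 temp = int(listA[i][j])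
--                 temp += tambah
--                 listA[i][j] = temp
--                 tambah += 2
--     return listA
-- ===== SOURCE B (Python) =====
-- def CCw(listA):
--     # Recursive over the row list, threading the row's starting offset (2, then -4 each
--     # step) and pairing each row with an arithmetic range via zip; stops after 3 rows.
--     def go(rows, base, remaining):
--         if remaining == 0 or not rows:
--             return list(rows)
--         head = [int(x) + o for x, o in zip(rows[0], range(base, base + 2 * len(rows[0]), 2))]
--         return [head] + go(rows[1:], base - 4, remaining - 1)
--     listA[:] = go(listA, 2, 3)
--     return listA
-- ===== Notes on version B (the rewrite author's own statement) =====
-- stated objective: alternative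
-- what changed: Replaces A's indexed outer loop with i==0/1/2 branches and a stateful per-element 'tambah += 2' accumulator by a recursion over the row list threading the row base offset (base - 4 per step, capped at 3 rows), where each row is rebuilt by zipping it with a precomputed arithmetic range of offsets.
import Mathlib
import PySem

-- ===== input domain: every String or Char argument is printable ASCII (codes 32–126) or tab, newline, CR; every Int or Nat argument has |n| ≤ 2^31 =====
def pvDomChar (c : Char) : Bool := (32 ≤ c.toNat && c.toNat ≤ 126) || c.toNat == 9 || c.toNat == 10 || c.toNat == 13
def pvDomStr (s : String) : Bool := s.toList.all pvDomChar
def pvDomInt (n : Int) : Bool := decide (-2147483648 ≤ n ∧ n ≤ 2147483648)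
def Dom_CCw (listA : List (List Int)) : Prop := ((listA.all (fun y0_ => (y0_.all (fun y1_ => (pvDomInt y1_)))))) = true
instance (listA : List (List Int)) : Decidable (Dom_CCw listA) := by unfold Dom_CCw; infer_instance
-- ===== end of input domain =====

-- B replaces A's indexed loop with i==0/1/2 branches and the per-element 'tambah += 2'
-- accumulator by a recursion over rows threading the base offset (-4 per row, capped at 3)
-- and zipping each row with an arithmetic range of offsets (alternative decomposition).
-- Both mutate listA in place in Python; the equivalence proved here is about the return value.
-- ===== PORT A =====
-- inner loop: temp = int(row[j]) + tambah; row[j] = temp; tambah += 2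
def pvRowA : List Int → Int → List Int
  | [], _ => []
  | x :: xs, tambah => (x + tambah) :: pvRowA xs (tambah + 2)

-- outer loop over row index i with the i == 0 / 1 / 2 branches
def pvOuterA : Nat → List (List Int) → List (List Int)
  | _, [] => []
  | i, r :: rs =>
    (if i = 0 then pvRowA r 2
     else if i = 1 then pvRowA r (-2)
     else if i = 2 then pvRowA r (-6)
     else r) :: pvOuterA (i + 1) rs

def CCw (listA : List (List Int)) : List (List Int) := pvOuterA 0 listA

-- ===== PORT B =====
-- go(rows, base, remaining): stop at remaining == 0 or empty; head row is zipped with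
-- range(base, base + 2*len(row), 2); recurse on the tail with base - 4.
def pvGoB : List (List Int) → Int → Nat → List (List Int)
  | rows, _, 0 => rows
  | [], _, _ + 1 => []
  | r :: rs, base, n + 1 =>
    (List.zipWith (fun x o => x + o) r
        (PySem.List.pyRange base (base + 2 * (r.length : Int)) 2)) :: pvGoB rs (base - 4) n

def CCw_alt (listA : List (List Int)) : List (List Int) := pvGoB listA 2 3

-- ===== PRECONDITION & SPEC =====
def Spec_CCw (listA : List (List Int)) (out : List (List Int)) : Prop := out = CCw_alt listA
instance (listA : List (List Int)) (out : List (List Int)) : Decidable (Spec_CCw listA out) := by unfold Spec_CCw; infer_instance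

-- ===== CLAIM (what is proved, stated in full; the proofs are below) =====
def Claim_equal_CCw : Prop := ∀ (listA : List (List Int)), Dom_CCw listA → Spec_CCw listA (CCw listA)

-- ===== LEMMAS AND PROOFS =====
theorem pyRange_two_cons (a : Int) (n : Nat) :
    PySem.List.pyRange a (a + 2 * ((n : Int) + 1)) 2
      = a :: PySem.List.pyRange (a + 2) ((a + 2) + 2 * (n : Int)) 2 := by
  rw [PySem.List.pyRange_of_pos _ _ (by norm_num : (0:Int) < 2),
      PySem.List.pyRange_of_pos _ _ (by norm_num : (0:Int) < 2)]
  have h1 : a < a + 2 * ((n : Int) + 1) := by omega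
  have hL : ((a + 2 * ((n : Int) + 1) - a + 2 - 1) / 2).toNat = n + 1 := by omega
  have hR : (if a + 2 < a + 2 + 2 * (n : Int) then ((a + 2 + 2 * (n : Int) - (a + 2) + 2 - 1) / 2).toNat else 0) = n := by
    split_ifs with h <;> omega
  rw [if_pos h1, hL, hR, List.range_succ_eq_map, List.map_cons, List.map_map]
  refine congrArg₂ _ (by ring) ?_
  refine List.map_congr_left (fun k _ => ?_)
  simp only [Function.comp]
  push_cast
  ring

theorem rowB_eq (r : List Int) : ∀ t : Int,
    List.zipWith (fun x o => x + o) r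
      (PySem.List.pyRange t (t + 2 * (r.length : Int)) 2) = pvRowA r t := by
  induction r with
  | nil => intro t; simp [pvRowA, List.zipWith]
  | cons x xs ih =>
    intro t
    have hlen : ((x :: xs).length : Int) = (xs.length : Int) + 1 := by
      push_cast [List.length_cons]; ring
    rw [pvRowA, hlen, pyRange_two_cons t xs.length]
    simp [List.zipWith, ih (t + 2)]

theorem pvOuterA_ge3 (rs : List (List Int)) : ∀ i : Nat, 3 ≤ i → pvOuterA i rs = rs := by
  induction rs with
  | nil => intro i _; rfl
  | cons r rs ih =>
    intro i hi
    have h0 : i ≠ 0 := by omega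
    have h1 : i ≠ 1 := by omega
    have h2 : i ≠ 2 := by omega
    simp [pvOuterA, h0, h1, h2, ih (i + 1) (by omega)]

-- ===== VERDICT (by name: the statement is the Claim_ definition above) =====
theorem CCw_spec : Claim_equal_CCw := by
  intro listA _
  unfold Spec_CCw CCw CCw_alt
  match listA with
  | [] => rfl
  | [a] => simp [pvOuterA, pvGoB, rowB_eq]
  | [a, b] => simp [pvOuterA, pvGoB, rowB_eq]
  | a :: b :: c :: rs =>
    simp [pvOuterA, pvGoB, rowB_eq, pvOuterA_ge3 rs 3 (by omega)]
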